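-- pv_equiv track=rewrite | github.com/1sh1ro/Agentless | agentless/fl/FL.py | _parse_model_return_lines
-- ===== SOURCE A (Python) =====
-- def _parse_model_return_lines(content: str) -> list[str]:
--     """解析模型返回的内容，提取```代码块中的文件名列表"""
--     if not content:
--         return []
--
--     lines = content.strip().split("\n")
--     result = []
--     in_code_block = False
--
--     for line in lines:
--         line = line.strip()
--         if line.startswith("```"):
--             if in_code_block:
--                 # 结束代码块
--                 break
--             else:
--                 # 开始代码块
--                 in_code_block = True
--                 continue
--
--         if in_code_block and line:
--             # 在代码块内，且不是空行
--             result.append(line)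
--
--     return result
-- ===== SOURCE B (Python) =====
-- def _parse_model_return_lines(content: str) -> list[str]:
--     if not content:
--         return []
--     # Partition the stripped lines into segments delimited by ``` fence lines;
--     # the first code block's content is exactly the second segment.
--     segments = [[]]
--     for raw in content.strip().split("\n"):
--         line = raw.strip()
--         if line.startswith("```"):
--             segments.append([])
--         elif line:
--             segments[-1].append(line)
--     return segments[1] if len(segments) > 1 else []
-- ===== Notes on version B (the rewrite author's own statement) =====
-- stated objective: alternative
-- what changed: B partitions all stripped lines into a list of segments delimited by fence lines and returns the second segment, instead of A's stateful scan with an in_code_block flag, break and continue.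
import Mathlib
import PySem

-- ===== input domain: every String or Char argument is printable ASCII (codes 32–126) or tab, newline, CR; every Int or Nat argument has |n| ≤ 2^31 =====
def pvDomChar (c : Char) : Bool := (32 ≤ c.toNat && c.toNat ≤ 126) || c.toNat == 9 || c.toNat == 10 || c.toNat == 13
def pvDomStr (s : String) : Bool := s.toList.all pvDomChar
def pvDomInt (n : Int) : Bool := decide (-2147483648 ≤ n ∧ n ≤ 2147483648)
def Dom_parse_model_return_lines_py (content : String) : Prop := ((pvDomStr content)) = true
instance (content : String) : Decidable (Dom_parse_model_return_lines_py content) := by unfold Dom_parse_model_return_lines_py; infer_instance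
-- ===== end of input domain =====

-- B partitions the stripped lines into fence-delimited segments and returns the second segment, instead of A's flag/break/continue scan; same result, no speed claim.

-- ===== PORT A =====
-- A's for-loop with its in_code_block flag, break and continue, as structural recursion.
def pvGoA : List String → Bool → List String → List String
  | [], _, result => result
  | l :: rest, inCodeBlock, result =>
    let line := PySem.Str.strip l
    if PySem.Str.startswith line "```" then
      if inCodeBlock then result            -- break
      else pvGoA rest true result           -- continue, now inside the block
    else if inCodeBlock && !(line == "") then
      pvGoA rest inCodeBlock (result ++ [line])
    else
      pvGoA rest inCodeBlock result

def parse_model_return_lines_py (content : String) : List String :=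
  if content == "" then []
  else pvGoA ((PySem.Str.split? (PySem.Str.strip content) "\n").getD []) false []

-- ===== PORT B =====
-- segments[-1].append(line): append to the last segment of the partition.
def pvAppendLast : List (List String) → String → List (List String)
  | [], _ => []
  | [s], l => [s ++ [l]]
  | s :: rest, l => s :: pvAppendLast rest l

-- one step of B's loop body over the running partition
def pvStepB (segs : List (List String)) (raw : String) : List (List String) :=
  let line := PySem.Str.strip raw
  if PySem.Str.startswith line "```" then segs ++ [[]]
  else if !(line == "") then pvAppendLast segs line
  else segs

def parse_model_return_lines_py_alt (content : String) : List String :=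
  if content == "" then []
  else
    let segments := ((PySem.Str.split? (PySem.Str.strip content) "\n").getD []).foldl pvStepB [[]]
    if segments.length > 1 then segments.getD 1 [] else []

-- ===== PRECONDITION & SPEC =====
def Spec_parse_model_return_lines_py (content : String) (out : List String) : Prop := out = parse_model_return_lines_py_alt content
instance (content : String) (out : List String) : Decidable (Spec_parse_model_return_lines_py content out) := by unfold Spec_parse_model_return_lines_py; infer_instance

-- ===== CLAIM (what is proved, stated in full; the proofs are below) =====
def Claim_equal_parse_model_return_lines_py : Prop := ∀ (content : String), Dom_parse_model_return_lines_py content → Spec_parse_model_return_lines_py content (parse_model_return_lines_py content)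

-- ===== LEMMAS AND PROOFS =====

-- B's final selection, as a proof-side helper.
def pvSecond (segs : List (List String)) : List String :=
  if segs.length > 1 then segs.getD 1 [] else []

-- fence test on the empty (stripped-away) line, used by simp below
theorem pv_startswith_nil : PySem.Chars.startswith [] ['`', '`', '`'] = false := by decide

-- Once three segments exist, the head two (hence the returned second one) are frozen.
theorem pv_fold_shape (ls : List String) (a b c : List String) (cs : List (List String)) :
    ∃ c' cs', ls.foldl pvStepB (a :: b :: c :: cs) = a :: b :: c' :: cs' := by
  induction ls generalizing a b c cs with
  | nil => exact ⟨c, cs, rfl⟩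
  | cons l rest ih =>
    rw [List.foldl_cons]
    by_cases h : PySem.Str.startswith (PySem.Str.strip l) "```" = true
    · have hc : PySem.Chars.startswith (PySem.Chars.strip l.toList) ['`', '`', '`'] = true := by
        simpa using h
      have hstep : pvStepB (a :: b :: c :: cs) l = a :: b :: c :: (cs ++ [[]]) := by
        simp [pvStepB, hc]
      rw [hstep]; exact ih a b c (cs ++ [[]])
    · have hc : PySem.Chars.startswith (PySem.Chars.strip l.toList) ['`', '`', '`'] = false := by
        simpa using h
      by_cases he : PySem.Str.strip l = ""
      · have hstep : pvStepB (a :: b :: c :: cs) l = a :: b :: c :: cs := by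
          simp [pvStepB, he, pv_startswith_nil]
        rw [hstep]; exact ih a b c cs
      · have hstep : pvStepB (a :: b :: c :: cs) l
            = a :: b :: pvAppendLast (c :: cs) (PySem.Str.strip l) := by
          simp [pvStepB, pvAppendLast, hc, he]
        rw [hstep]
        cases cs with
        | nil =>
          have h1 : pvAppendLast [c] (PySem.Str.strip l) = [c ++ [PySem.Str.strip l]] := by
            simp [pvAppendLast]
          rw [h1]; exact ih a b (c ++ [PySem.Str.strip l]) []
        | cons c2 cs2 =>
          have h1 : pvAppendLast (c :: c2 :: cs2) (PySem.Str.strip l)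
              = c :: pvAppendLast (c2 :: cs2) (PySem.Str.strip l) := by
            simp [pvAppendLast]
          rw [h1]; exact ih a b c (pvAppendLast (c2 :: cs2) (PySem.Str.strip l))

-- A's in-block phase equals B's fold from a two-segment partition.
theorem pv_goA_true (ls : List String) (s0 acc : List String) :
    pvGoA ls true acc = pvSecond (ls.foldl pvStepB [s0, acc]) := by
  induction ls generalizing acc with
  | nil => simp [pvGoA, pvSecond, List.getD]
  | cons l rest ih =>
    rw [List.foldl_cons]
    by_cases h : PySem.Str.startswith (PySem.Str.strip l) "```" = true
    · have hc : PySem.Chars.startswith (PySem.Chars.strip l.toList) ['`', '`', '`'] = true := by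
        simpa using h
      have hL : pvGoA (l :: rest) true acc = acc := by simp [pvGoA, hc]
      have hstep : pvStepB [s0, acc] l = [s0, acc, []] := by simp [pvStepB, hc]
      obtain ⟨c', cs', hsh⟩ := pv_fold_shape rest s0 acc [] []
      rw [hL, hstep, hsh]
      simp [pvSecond, List.getD]
    · have hc : PySem.Chars.startswith (PySem.Chars.strip l.toList) ['`', '`', '`'] = false := by
        simpa using h
      by_cases he : PySem.Str.strip l = ""
      · have hL : pvGoA (l :: rest) true acc = pvGoA rest true acc := by
          simp [pvGoA, he, pv_startswith_nil]
        have hstep : pvStepB [s0, acc] l = [s0, acc] := by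
          simp [pvStepB, he, pv_startswith_nil]
        rw [hL, hstep]; exact ih acc
      · have hL : pvGoA (l :: rest) true acc = pvGoA rest true (acc ++ [PySem.Str.strip l]) := by
          simp [pvGoA, hc, he]
        have hstep : pvStepB [s0, acc] l = [s0, acc ++ [PySem.Str.strip l]] := by
          simp [pvStepB, pvAppendLast, hc, he]
        rw [hL, hstep]; exact ih (acc ++ [PySem.Str.strip l])

-- A's searching phase equals B's fold from a one-segment partition.
theorem pv_goA_false (ls : List String) (s0 : List String) :
    pvGoA ls false [] = pvSecond (ls.foldl pvStepB [s0]) := by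
  induction ls generalizing s0 with
  | nil => simp [pvGoA, pvSecond]
  | cons l rest ih =>
    rw [List.foldl_cons]
    by_cases h : PySem.Str.startswith (PySem.Str.strip l) "```" = true
    · have hc : PySem.Chars.startswith (PySem.Chars.strip l.toList) ['`', '`', '`'] = true := by
        simpa using h
      have hL : pvGoA (l :: rest) false [] = pvGoA rest true [] := by simp [pvGoA, hc]
      have hstep : pvStepB [s0] l = [s0, []] := by simp [pvStepB, hc]
      rw [hL, hstep]; exact pv_goA_true rest s0 []
    · have hc : PySem.Chars.startswith (PySem.Chars.strip l.toList) ['`', '`', '`'] = false := by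
        simpa using h
      by_cases he : PySem.Str.strip l = ""
      · have hL : pvGoA (l :: rest) false [] = pvGoA rest false [] := by
          simp [pvGoA, he, pv_startswith_nil]
        have hstep : pvStepB [s0] l = [s0] := by
          simp [pvStepB, he, pv_startswith_nil]
        rw [hL, hstep]; exact ih s0
      · have hL : pvGoA (l :: rest) false [] = pvGoA rest false [] := by
          simp [pvGoA, hc]
        have hstep : pvStepB [s0] l = [s0 ++ [PySem.Str.strip l]] := by
          simp [pvStepB, pvAppendLast, hc, he]
        rw [hL, hstep]; exact ih (s0 ++ [PySem.Str.strip l])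

-- ===== VERDICT (by name: the statement is the Claim_ definition above) =====
theorem parse_model_return_lines_py_spec : Claim_equal_parse_model_return_lines_py := by
  intro content _
  unfold Spec_parse_model_return_lines_py parse_model_return_lines_py parse_model_return_lines_py_alt
  by_cases h : (content == "") = true
  · rw [if_pos h, if_pos h]
  · have h' : (content == "") = false := by simpa using h
    rw [if_neg (by simp [h']), if_neg (by simp [h'])]
    rw [pv_goA_false _ []]
    rfl
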